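-- pv_equiv track=rewrite | github.com/alazkiyai09/fl-adversarial-security | src/secure_aggregation/legacy/protocol/dropout_recovery.py | graceful_degradation_analysis
-- ===== SOURCE A (Python) =====
-- from typing import List, Dict, Tuple, Optional, Any
--
-- def graceful_degradation_analysis(
--     num_clients: int,
--     threshold: int
-- ) -> Dict[int, str]:
--     """
--     Analyze how system degrades with varying numbers of dropouts.
--
--     Args:
--         num_clients: Total number of clients
--         threshold: Secret sharing threshold
--
--     Returns:
--         Dictionary mapping num_dead -> status
--     """
--     degradation = {}
--
--     for num_dead in range(num_clients + 1):
--         num_active = num_clients - num_dead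
--
--         if num_active < threshold:
--             status = "FAIL: Insufficient clients"
--         elif num_dead == 0:
--             status = "OPTIMAL: No dropouts"
--         elif num_dead <= num_clients - threshold:
--             status = "OPERATIONAL: With recovery"
--         else:
--             status = "FAIL: Too many dropouts"
--
--         degradation[num_dead] = status
--
--     return degradation
-- ===== SOURCE B (Python) =====
-- def graceful_degradation_analysis(num_clients: int, threshold: int) -> dict:
--     """Boundary computation + segment fills instead of a per-index branch chain."""
--     if num_clients < 0:
--         return {}
--     cutoff = num_clients - threshold
--     if cutoff < 0:
--         return {d: "FAIL: Insufficient clients" for d in range(num_clients + 1)}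
--     band = min(cutoff, num_clients)
--     pairs = [(0, "OPTIMAL: No dropouts")]
--     pairs += [(d, "OPERATIONAL: With recovery") for d in range(1, band + 1)]
--     pairs += [(d, "FAIL: Insufficient clients") for d in range(band + 1, num_clients + 1)]
--     return dict(pairs)
-- ===== Notes on version B (the rewrite author's own statement) =====
-- stated objective: alternative
-- what changed: Replaces A's per-index if/elif branch evaluation inside one loop with computing the band boundary (num_clients - threshold) once and concatenating three pre-labelled key ranges (OPTIMAL head, OPERATIONAL band, FAIL tail) into the dict.
import Mathlib
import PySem

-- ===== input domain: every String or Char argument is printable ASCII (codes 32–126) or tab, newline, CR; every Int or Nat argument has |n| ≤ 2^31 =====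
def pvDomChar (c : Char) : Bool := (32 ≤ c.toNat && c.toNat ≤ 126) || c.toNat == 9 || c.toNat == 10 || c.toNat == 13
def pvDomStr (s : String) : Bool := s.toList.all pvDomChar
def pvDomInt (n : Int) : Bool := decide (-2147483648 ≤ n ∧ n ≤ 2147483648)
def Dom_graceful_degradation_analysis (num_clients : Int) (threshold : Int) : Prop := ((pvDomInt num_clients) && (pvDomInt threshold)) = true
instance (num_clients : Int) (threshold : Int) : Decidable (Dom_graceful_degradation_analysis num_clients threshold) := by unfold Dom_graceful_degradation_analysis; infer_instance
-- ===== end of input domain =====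

-- B replaces A's per-index if/elif chain by computing the band boundary once and
-- concatenating three pre-labelled segments (objective: alternative decomposition, same O(n) cost).

-- ===== PORT A =====
def graceful_degradation_analysis (num_clients : Int) (threshold : Int) : List (Int × String) :=
  ((PySem.List.pyRange 0 (num_clients + 1) 1).foldl
    (fun degradation num_dead =>
      let num_active := num_clients - num_dead
      let status :=
        if num_active < threshold then "FAIL: Insufficient clients"
        else if num_dead = 0 then "OPTIMAL: No dropouts"
        else if num_dead ≤ num_clients - threshold then "OPERATIONAL: With recovery"
        else "FAIL: Too many dropouts"
      degradation.insert num_dead status)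
    PySem.Dict.empty).items

-- ===== PORT B =====
def graceful_degradation_analysis_alt (num_clients : Int) (threshold : Int) : List (Int × String) :=
  if num_clients < 0 then []
  else
    let cutoff := num_clients - threshold
    if cutoff < 0 then
      (PySem.Dict.ofList ((PySem.List.pyRange 0 (num_clients + 1) 1).map
        (fun d => (d, "FAIL: Insufficient clients")))).items
    else
      let band := min cutoff num_clients
      let pairs := [((0 : Int), "OPTIMAL: No dropouts")]
        ++ (PySem.List.pyRange 1 (band + 1) 1).map (fun d => (d, "OPERATIONAL: With recovery"))
        ++ (PySem.List.pyRange (band + 1) (num_clients + 1) 1).map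
             (fun d => (d, "FAIL: Insufficient clients"))
      (PySem.Dict.ofList pairs).items

-- ===== PRECONDITION & SPEC =====
def Spec_graceful_degradation_analysis (num_clients : Int) (threshold : Int) (out : List (Int × String)) : Prop := out = graceful_degradation_analysis_alt num_clients threshold
instance (num_clients : Int) (threshold : Int) (out : List (Int × String)) : Decidable (Spec_graceful_degradation_analysis num_clients threshold out) := by unfold Spec_graceful_degradation_analysis; infer_instance

-- ===== CLAIM (what is proved, stated in full; the proofs are below) =====
def Claim_equal_graceful_degradation_analysis : Prop := ∀ (num_clients : Int) (threshold : Int), Dom_graceful_degradation_analysis num_clients threshold → Spec_graceful_degradation_analysis num_clients threshold (graceful_degradation_analysis num_clients threshold)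

-- ===== LEMMAS AND PROOFS =====

-- dict(pairs) with pairwise-distinct keys is exactly the pairs list.
theorem items_ofList_of_nodup_keys (l : List (Int × String)) (h : (l.map Prod.fst).Nodup) :
    (PySem.Dict.ofList l).items = l := by
  show (l.foldl (fun d p => d.insert p.1 p.2) PySem.Dict.empty).items = l
  rw [PySem.Dict.items_foldl_insert_fresh l Prod.fst Prod.snd PySem.Dict.empty
    (fun a _ => PySem.Dict.contains_empty _) h]
  simp [PySem.Dict.empty]

-- A's loop appends fresh distinct keys, so its dict's items are the mapped range.
theorem portA_eq_map (n t : Int) :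
    graceful_degradation_analysis n t
      = (PySem.List.pyRange 0 (n + 1) 1).map (fun d =>
          (d, if n - d < t then "FAIL: Insufficient clients"
              else if d = 0 then "OPTIMAL: No dropouts"
              else if d ≤ n - t then "OPERATIONAL: With recovery"
              else "FAIL: Too many dropouts")) := by
  unfold graceful_degradation_analysis
  rw [PySem.Dict.items_foldl_insert_fresh (PySem.List.pyRange 0 (n + 1) 1) (fun d => d)
    (fun d => if n - d < t then "FAIL: Insufficient clients"
              else if d = 0 then "OPTIMAL: No dropouts"
              else if d ≤ n - t then "OPERATIONAL: With recovery"
              else "FAIL: Too many dropouts")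
    PySem.Dict.empty (fun a _ => PySem.Dict.contains_empty _)
    (by simpa using PySem.List.nodup_pyRange_one 0 (n + 1))]
  simp [PySem.Dict.empty]

theorem graceful_equal (n t : Int) :
    graceful_degradation_analysis n t = graceful_degradation_analysis_alt n t := by
  have key1 : (Prod.fst ∘ fun d : Int => (d, "OPERATIONAL: With recovery")) = id := rfl
  have key2 : (Prod.fst ∘ fun d : Int => (d, "FAIL: Insufficient clients")) = id := rfl
  rw [portA_eq_map]
  unfold graceful_degradation_analysis_alt
  by_cases hn : n < 0
  · rw [if_pos hn, PySem.List.pyRange_one]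
    simp
    omega
  · rw [if_neg hn]
    by_cases hc : n - t < 0
    · simp only [if_pos hc]
      rw [items_ofList_of_nodup_keys _ (by
        simp only [List.map_map, key2, List.map_id]
        exact PySem.List.nodup_pyRange_one 0 (n + 1))]
      refine List.map_congr_left (fun x hx => ?_)
      rw [PySem.List.mem_pyRange_one] at hx
      have h1 : n - x < t := by omega
      simp [h1]
    · simp only [if_neg hc]
      set band := min (n - t) n with hband
      have hb0 : 0 ≤ band := by omega
      have hbn : band ≤ n := by omega
      rw [items_ofList_of_nodup_keys _ ?nodup]
      case nodup =>
        simp only [List.map_append, List.map_map, List.map_cons, List.singleton_append,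
          key1, key2, List.map_id]
        refine List.Nodup.cons ?_ ?_
        · intro hmem
          rcases List.mem_append.mp hmem with h | h <;>
            · rw [PySem.List.mem_pyRange_one] at h; omega
        · refine List.Nodup.append (PySem.List.nodup_pyRange_one _ _)
            (PySem.List.nodup_pyRange_one _ _) ?_
          intro x hx hy
          rw [PySem.List.mem_pyRange_one] at hx hy
          omega
      · rw [show PySem.List.pyRange 0 (n + 1) 1 = 0 :: PySem.List.pyRange 1 (n + 1) 1 from
          by simpa using PySem.List.pyRange_one_cons (a := 0) (b := n + 1) (by omega),
          PySem.List.pyRange_one_append 1 (band + 1) (n + 1) (by omega) (by omega)]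
        simp only [List.map_cons, List.map_append, List.singleton_append]
        congr 1
        · simp [show ¬ (n < t) by omega]
        congr 1
        · refine List.map_congr_left (fun x hx => ?_)
          rw [PySem.List.mem_pyRange_one] at hx
          have h1 : ¬ (n - x < t) := by omega
          have h2 : x ≠ 0 := by omega
          have h3 : x ≤ n - t := by omega
          simp [h1, h2, h3]
        · refine List.map_congr_left (fun x hx => ?_)
          rw [PySem.List.mem_pyRange_one] at hx
          have h1 : n - x < t := by omega
          simp [h1]

-- ===== VERDICT (by name: the statement is the Claim_ definition above) =====
theorem graceful_degradation_analysis_spec : Claim_equal_graceful_degradation_analysis := by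
  intro n t _
  unfold Spec_graceful_degradation_analysis
  exact graceful_equal n t
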